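-- pv_equiv track=rewrite | github.com/loco9939/Programmers-Python | test.py | solution
-- ===== SOURCE A (Python) =====
-- def solution(arr, queries):
--     answer = []
--
--     for query in queries:
--         s,e,k = query
--         k_arr = 1_000_000
--         for i in range(len(arr)):
--             if (s <= i and i <= e and arr[i] > k):
--                 if (k < arr[i]):
--                     k_arr = arr[i]
--         if (k_arr == 1_000_000):
--             k_arr = -1
--         answer.append(k_arr)
--     return answer
-- ===== SOURCE B (Python) =====
-- def solution(arr, queries):
--     n = len(arr)
--     answer = []
--     for s, e, k in queries:
--         res = -1
--         for i in range(min(e, n - 1), max(s, 0) - 1, -1):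
--             if arr[i] > k:
--                 res = arr[i]
--                 break
--         answer.append(res)
--     return answer
-- ===== Notes on version B (the rewrite author's own statement) =====
-- stated objective: faster
-- what changed: A scans the whole array forward for every query, rewriting a 1_000_000 sentinel at each qualifying index; B scans only the clamped window [max(s,0), min(e,n-1)] backward and returns at the first value exceeding k, with no sentinel.
-- intended difference: On inputs where some query's rightmost in-window value exceeding k is exactly 1000000, A's sentinel collapses it to -1 (as if no match) while B returns 1000000, the intended 'rightmost value > k' answer. — e.g. on solution([1000000], [(0, 0, 5)]): A returns [-1], B returns [1000000]
import Mathlib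
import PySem

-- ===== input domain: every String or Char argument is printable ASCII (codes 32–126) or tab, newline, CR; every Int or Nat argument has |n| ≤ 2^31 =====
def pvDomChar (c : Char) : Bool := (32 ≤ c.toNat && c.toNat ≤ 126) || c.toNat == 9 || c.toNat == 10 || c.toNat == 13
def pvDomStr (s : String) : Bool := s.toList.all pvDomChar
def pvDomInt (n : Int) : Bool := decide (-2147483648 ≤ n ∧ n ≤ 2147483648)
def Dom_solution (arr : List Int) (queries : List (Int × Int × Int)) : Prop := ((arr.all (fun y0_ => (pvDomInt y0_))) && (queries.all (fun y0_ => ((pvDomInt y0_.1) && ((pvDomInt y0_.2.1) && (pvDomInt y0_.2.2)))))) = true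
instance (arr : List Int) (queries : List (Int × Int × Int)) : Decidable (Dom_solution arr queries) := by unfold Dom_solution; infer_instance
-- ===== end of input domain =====

-- B replaces A's forward full-array scan with sentinel 1_000_000 by a backward scan of just the
-- clamped query window with early exit (no sentinel; measured faster); return-value equivalence only.

-- ===== PORT A =====
def solution (arr : List Int) (queries : List (Int × Int × Int)) : List Int :=
  queries.foldl (fun answer query =>
    let s := query.1
    let e := query.2.1
    let k := query.2.2
    let k_arr := (PySem.List.pyRange 0 (arr.length : Int) 1).foldl
      (fun k_arr i =>
        if s ≤ i ∧ i ≤ e ∧ PySem.List.pyGetD arr i 0 > k then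
          if k < PySem.List.pyGetD arr i 0 then PySem.List.pyGetD arr i 0 else k_arr
        else k_arr) 1000000
    answer ++ [if k_arr = 1000000 then -1 else k_arr]) []

-- ===== PORT B =====
-- the 'for … break' loop of Source B: walk the descending index list, stop at the first hit
def scanBack (arr : List Int) (k : Int) : List Int → Int
  | [] => -1
  | i :: rest =>
      if PySem.List.pyGetD arr i 0 > k then PySem.List.pyGetD arr i 0 else scanBack arr k rest

def solution_alt (arr : List Int) (queries : List (Int × Int × Int)) : List Int :=
  queries.foldl (fun answer query =>
    answer ++ [scanBack arr query.2.2
      (PySem.List.pyRange (min query.2.1 ((arr.length : Int) - 1)) (max query.1 0 - 1) (-1))]) []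

-- ===== PRECONDITION & SPEC =====
-- For queries whose rightmost in-window value exceeding k is exactly 1_000_000, A's sentinel
-- collapses that value to -1 ("no match") while B returns the value itself, which is the intended
-- answer ("rightmost value > k, else -1").
def D_solution (arr : List Int) (queries : List (Int × Int × Int)) : Prop :=
  ∃ q ∈ queries, ∃ i ∈ List.range arr.length,
    q.1 ≤ (i : Int) ∧ (i : Int) ≤ q.2.1 ∧ arr.getD i 0 = 1000000 ∧ q.2.2 < 1000000 ∧
    ∀ j ∈ List.range arr.length, i < j → (j : Int) ≤ q.2.1 → arr.getD j 0 ≤ q.2.2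

instance (arr : List Int) (queries : List (Int × Int × Int)) : Decidable (D_solution arr queries) := by
  unfold D_solution; infer_instance

def Spec_solution (arr : List Int) (queries : List (Int × Int × Int)) (out : List Int) : Prop :=
  ¬ D_solution arr queries → out = solution_alt arr queries
instance (arr : List Int) (queries : List (Int × Int × Int)) (out : List Int) : Decidable (Spec_solution arr queries out) := by unfold Spec_solution; infer_instance

def pvDiffWitness_solution : List Int × (List (Int × Int × Int)) := ([1000000], [(0, 0, 5)])
def pvDiffWitnessOut_solution : (List Int) × (List Int) := ([-1], [1000000])

-- ===== CLAIM (what is proved, stated in full; the proofs are below) =====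
def Claim_unchanged_solution : Prop := ∀ (arr : List Int) (queries : List (Int × Int × Int)), Dom_solution arr queries → Spec_solution arr queries (solution arr queries)
def Claim_changed_solution : Prop := Dom_solution (pvDiffWitness_solution.1) (pvDiffWitness_solution.2) ∧ D_solution (pvDiffWitness_solution.1) (pvDiffWitness_solution.2) ∧ solution (pvDiffWitness_solution.1) (pvDiffWitness_solution.2) = pvDiffWitnessOut_solution.1 ∧ solution_alt (pvDiffWitness_solution.1) (pvDiffWitness_solution.2) = pvDiffWitnessOut_solution.2 ∧ pvDiffWitnessOut_solution.1 ≠ pvDiffWitnessOut_solution.2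
def Claim_exact_solution : Prop := ∀ (arr : List Int) (queries : List (Int × Int × Int)), Dom_solution arr queries → D_solution arr queries → solution arr queries ≠ solution_alt arr queries

-- ===== LEMMAS AND PROOFS =====

-- first hit (value > k) walking a list of indices; shared reference for both ports
def fw (arr : List Int) (k : Int) : List Int → Option Int
  | [] => none
  | i :: r => if PySem.List.pyGetD arr i 0 > k then some (PySem.List.pyGetD arr i 0) else fw arr k r

lemma scanBack_eq_fw (arr : List Int) (k : Int) (l : List Int) :
    scanBack arr k l = (fw arr k l).getD (-1) := by
  induction l with
  | nil => rfl
  | cons i r ih => simp only [scanBack, fw]; split_ifs <;> simp [ih]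

-- A's inner loop, read back to front
def rs (arr : List Int) (s e k : Int) : List Int → Int → Int
  | [], c => c
  | i :: r, c =>
      if s ≤ i ∧ i ≤ e ∧ PySem.List.pyGetD arr i 0 > k then PySem.List.pyGetD arr i 0
      else rs arr s e k r c

lemma foldl_eq_rs (arr : List Int) (s e k : Int) (l : List Int) (c : Int) :
    l.foldl (fun k_arr i =>
        if s ≤ i ∧ i ≤ e ∧ PySem.List.pyGetD arr i 0 > k then
          if k < PySem.List.pyGetD arr i 0 then PySem.List.pyGetD arr i 0 else k_arr
        else k_arr) c = rs arr s e k l.reverse c := by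
  induction l using List.reverseRecOn generalizing c with
  | nil => rfl
  | append_singleton l x ih =>
      rw [List.foldl_append, List.reverse_append]
      simp only [List.foldl_cons, List.foldl_nil, List.reverse_singleton, List.singleton_append, rs]
      split_ifs with h1 h2
      · rfl
      · exact absurd h1.2.2 h2
      · exact ih c

lemma rs_skip (arr : List Int) (s e k : Int) (l1 l2 : List Int) (c : Int)
    (h : ∀ i ∈ l1, ¬(s ≤ i ∧ i ≤ e ∧ PySem.List.pyGetD arr i 0 > k)) :
    rs arr s e k (l1 ++ l2) c = rs arr s e k l2 c := by
  induction l1 with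
  | nil => rfl
  | cons i r ih =>
      simp only [List.cons_append, rs]
      rw [if_neg (h i (by simp)), ih (fun j hj => h j (by simp [hj]))]

lemma rs_window (arr : List Int) (s e k : Int) (W P : List Int) (c : Int)
    (hW : ∀ i ∈ W, s ≤ i ∧ i ≤ e)
    (hP : ∀ i ∈ P, ¬(s ≤ i ∧ i ≤ e ∧ PySem.List.pyGetD arr i 0 > k)) :
    rs arr s e k (W ++ P) c = (fw arr k W).getD c := by
  induction W with
  | nil =>
      simp only [List.nil_append, fw, Option.getD_none]
      have := rs_skip arr s e k P [] c hP
      simpa using this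
  | cons i r ih =>
      have hie := hW i (by simp)
      simp only [List.cons_append, rs, fw]
      by_cases hk : PySem.List.pyGetD arr i 0 > k
      · rw [if_pos ⟨hie.1, hie.2, hk⟩, if_pos hk]; rfl
      · rw [if_neg (by tauto), if_neg hk, ih (fun j hj => hW j (by simp [hj]))]

-- A's whole scan equals the first hit over the clamped backward window, default c
lemma rs_full (arr : List Int) (s e k c : Int) :
    rs arr s e k ((PySem.List.pyRange 0 (arr.length : Int) 1).reverse) c =
      (fw arr k (PySem.List.pyRange (min e ((arr.length : Int) - 1)) (max s 0 - 1) (-1))).getD c := by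
  have hN : (0:Int) ≤ (arr.length : Int) := Int.natCast_nonneg _
  set N : Int := (arr.length : Int) with hNdef
  set s' : Int := max s 0 with hs'
  set e' : Int := min e (N - 1) with he'
  rw [PySem.List.pyRange_neg_one_eq_reverse]
  have hsimp : s' - 1 + 1 = s' := by ring
  rw [hsimp]
  by_cases hcase : s' ≤ e' + 1
  · have h1 : (0:Int) ≤ s' := le_max_right _ _
    have h2 : e' + 1 ≤ N := by omega
    rw [PySem.List.pyRange_one_append 0 s' N h1 (le_trans hcase h2),
        PySem.List.pyRange_one_append s' (e' + 1) N hcase h2,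
        List.reverse_append, List.reverse_append, List.append_assoc]
    have hskip : ∀ i ∈ (PySem.List.pyRange (e' + 1) N 1).reverse,
        ¬(s ≤ i ∧ i ≤ e ∧ PySem.List.pyGetD arr i 0 > k) := by
      intro i hi
      rw [List.mem_reverse, PySem.List.mem_pyRange_one] at hi
      rintro ⟨hsi, hie, -⟩
      omega
    rw [rs_skip arr s e k ((PySem.List.pyRange (e' + 1) N 1).reverse)
          ((PySem.List.pyRange s' (e' + 1) 1).reverse ++ (PySem.List.pyRange 0 s' 1).reverse) c hskip]
    have hW : ∀ i ∈ (PySem.List.pyRange s' (e' + 1) 1).reverse, s ≤ i ∧ i ≤ e := by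
      intro i hi
      rw [List.mem_reverse, PySem.List.mem_pyRange_one] at hi
      constructor <;> omega
    have hP : ∀ i ∈ (PySem.List.pyRange 0 s' 1).reverse,
        ¬(s ≤ i ∧ i ≤ e ∧ PySem.List.pyGetD arr i 0 > k) := by
      intro i hi
      rw [List.mem_reverse, PySem.List.mem_pyRange_one] at hi
      rintro ⟨hsi, -, -⟩
      omega
    exact rs_window arr s e k _ _ c hW hP
  · rw [PySem.List.pyRange_one_eq_nil (a := s') (b := e' + 1) (by omega)]
    have hall : ∀ i ∈ (PySem.List.pyRange 0 N 1).reverse,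
        ¬(s ≤ i ∧ i ≤ e ∧ PySem.List.pyGetD arr i 0 > k) := by
      intro i hi
      rw [List.mem_reverse, PySem.List.mem_pyRange_one] at hi
      rintro ⟨hsi, hie, -⟩
      omega
    have := rs_skip arr s e k ((PySem.List.pyRange 0 N 1).reverse) [] c hall
    simpa [fw, rs] using this

-- first-hit over a countdown range, characterised
lemma fw_countdown (arr : List Int) (k v : Int) :
    ∀ (m : Nat) (a b : Int), (a - b).toNat = m →
      (fw arr k (PySem.List.pyRange a b (-1)) = some v ↔
        ∃ i : Int, b < i ∧ i ≤ a ∧ PySem.List.pyGetD arr i 0 = v ∧ PySem.List.pyGetD arr i 0 > k ∧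
          ∀ j : Int, i < j → j ≤ a → PySem.List.pyGetD arr j 0 ≤ k) := by
  intro m
  induction m with
  | zero =>
      intro a b hm
      rw [PySem.List.pyRange_neg_one_eq_nil (by omega)]
      simp only [fw]
      constructor
      · intro h; exact absurd h (by simp)
      · rintro ⟨i, hbi, hia, -⟩; omega
  | succ m ih =>
      intro a b hm
      have hba : b < a := by omega
      rw [PySem.List.pyRange_neg_one_cons hba]
      simp only [fw]
      by_cases hk : PySem.List.pyGetD arr a 0 > k
      · rw [if_pos hk]
        constructor
        · intro h
          refine ⟨a, hba, le_refl a, Option.some.inj h, hk, ?_⟩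
          intro j h1 h2; omega
        · rintro ⟨i, hbi, hia, hv, hvk, hall⟩
          rcases lt_or_eq_of_le hia with hlt | rfl
          · exact absurd hk (not_lt.mpr (hall a hlt (le_refl a)))
          · rw [hv]
      · rw [if_neg hk]
        rw [ih (a - 1) b (by omega)]
        constructor
        · rintro ⟨i, hbi, hia, hv, hvk, hall⟩
          refine ⟨i, hbi, by omega, hv, hvk, ?_⟩
          intro j h1 h2
          rcases lt_or_eq_of_le h2 with hlt | rfl
          · exact hall j h1 (by omega)
          · exact not_lt.mp hk
        · rintro ⟨i, hbi, hia, hv, hvk, hall⟩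
          have hne : i ≠ a := by rintro rfl; exact hk hvk
          refine ⟨i, hbi, by omega, hv, hvk, ?_⟩
          intro j h1 h2
          exact hall j h1 (by omega)

-- per-query values of the two ports
def fA (arr : List Int) (q : Int × Int × Int) : Int :=
  let k_arr := (PySem.List.pyRange 0 (arr.length : Int) 1).foldl
    (fun k_arr i =>
      if q.1 ≤ i ∧ i ≤ q.2.1 ∧ PySem.List.pyGetD arr i 0 > q.2.2 then
        if q.2.2 < PySem.List.pyGetD arr i 0 then PySem.List.pyGetD arr i 0 else k_arr
      else k_arr) 1000000
  if k_arr = 1000000 then -1 else k_arr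

def fB (arr : List Int) (q : Int × Int × Int) : Int :=
  scanBack arr q.2.2
    (PySem.List.pyRange (min q.2.1 ((arr.length : Int) - 1)) (max q.1 0 - 1) (-1))

lemma solution_eq_map (arr : List Int) (queries : List (Int × Int × Int)) :
    solution arr queries = queries.map (fA arr) := by
  show queries.foldl (fun answer query => answer ++ [fA arr query]) [] = queries.map (fA arr)
  rw [PySem.List.foldl_append_singleton_eq_map, List.nil_append]

lemma solution_alt_eq_map (arr : List Int) (queries : List (Int × Int × Int)) :
    solution_alt arr queries = queries.map (fB arr) := by
  show queries.foldl (fun answer query => answer ++ [fB arr query]) [] = queries.map (fB arr)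
  rw [PySem.List.foldl_append_singleton_eq_map, List.nil_append]

lemma fA_eq (arr : List Int) (q : Int × Int × Int) :
    fA arr q =
      (if (fw arr q.2.2 (PySem.List.pyRange (min q.2.1 ((arr.length : Int) - 1))
            (max q.1 0 - 1) (-1))).getD 1000000 = 1000000 then -1
       else (fw arr q.2.2 (PySem.List.pyRange (min q.2.1 ((arr.length : Int) - 1))
            (max q.1 0 - 1) (-1))).getD 1000000) := by
  unfold fA
  rw [foldl_eq_rs, rs_full]

lemma fB_eq (arr : List Int) (q : Int × Int × Int) :
    fB arr q =
      (fw arr q.2.2 (PySem.List.pyRange (min q.2.1 ((arr.length : Int) - 1))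
        (max q.1 0 - 1) (-1))).getD (-1) := by
  unfold fB
  rw [scanBack_eq_fw]

-- the sentinel hit is exactly membership of the change region, per query
lemma fw_iff_D (arr : List Int) (q : Int × Int × Int) :
    fw arr q.2.2 (PySem.List.pyRange (min q.2.1 ((arr.length : Int) - 1))
        (max q.1 0 - 1) (-1)) = some 1000000 ↔
      ∃ i ∈ List.range arr.length,
        q.1 ≤ (i : Int) ∧ (i : Int) ≤ q.2.1 ∧ arr.getD i 0 = 1000000 ∧ q.2.2 < 1000000 ∧
        ∀ j ∈ List.range arr.length, i < j → (j : Int) ≤ q.2.1 → arr.getD j 0 ≤ q.2.2 := by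
  rw [fw_countdown arr q.2.2 1000000
      ((min q.2.1 ((arr.length : Int) - 1) - (max q.1 0 - 1)).toNat)
      (min q.2.1 ((arr.length : Int) - 1)) (max q.1 0 - 1) rfl]
  constructor
  · rintro ⟨i, hbi, hia, hv, hvk, hall⟩
    have h0 : 0 ≤ i := by omega
    have hcast := PySem.List.pyGetD_natCast arr i.toNat (0 : Int)
    rw [Int.toNat_of_nonneg h0] at hcast
    refine ⟨i.toNat, by simp [List.mem_range]; omega, by omega, by omega,
      by rw [← hcast, hv], by rw [hv] at hvk; omega, ?_⟩
    intro j hj hij hje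
    have h0j : (0:Int) ≤ (j : Int) := Int.natCast_nonneg _
    have hjlen : j < arr.length := List.mem_range.mp hj
    have hcj := PySem.List.pyGetD_natCast arr j (0 : Int)
    rw [← hcj]
    exact hall (j : Int) (by omega) (by omega)
  · rintro ⟨i, hi, h1, h2, h3, h4, h5⟩
    have hilen : i < arr.length := List.mem_range.mp hi
    have hcast := PySem.List.pyGetD_natCast arr i (0 : Int)
    refine ⟨(i : Int), by omega, by omega, by rw [hcast, h3], by rw [hcast, h3]; omega, ?_⟩
    intro j hj1 hj2
    have h0j : 0 ≤ j := by omega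
    have hcj := PySem.List.pyGetD_natCast arr j.toNat (0 : Int)
    rw [Int.toNat_of_nonneg h0j] at hcj
    rw [hcj]
    exact h5 j.toNat (by simp [List.mem_range]; omega) (by omega) (by omega)

-- ===== VERDICT (by name: the statements are the Claim_ definitions above) =====
theorem solution_spec : Claim_unchanged_solution := by
  intro arr queries hdom
  unfold Spec_solution
  intro hnd
  rw [solution_eq_map, solution_alt_eq_map, List.map_inj_left]
  intro q hq
  rw [fA_eq, fB_eq]
  cases hfw : fw arr q.2.2 (PySem.List.pyRange (min q.2.1 ((arr.length : Int) - 1))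
      (max q.1 0 - 1) (-1)) with
  | none => simp
  | some v =>
      have hv : v ≠ 1000000 := by
        rintro rfl
        exact hnd ⟨q, hq, (fw_iff_D arr q).mp hfw⟩
      simp [hv]

theorem solution_tight : Claim_exact_solution := by
  intro arr queries hdom hD heq
  obtain ⟨q, hq, hDq⟩ := hD
  rw [solution_eq_map, solution_alt_eq_map, List.map_inj_left] at heq
  have hpt := heq q hq
  rw [fA_eq, fB_eq, (fw_iff_D arr q).mpr hDq] at hpt
  simp at hpt

theorem solution_changed : Claim_changed_solution := by unfold Claim_changed_solution; decide
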